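-- pv_equiv track=rewrite | github.com/fadoganinduto-hue/Blitz-Dashboard-Trial | utils.py | prev_period_info
-- ===== SOURCE A (Python) =====
-- def prev_period_info(periods: list[tuple], year: int, period_val) -> tuple | None:
--     """Given a sorted periods list, return the period immediately before (year, period_val)."""
--     keys = [(p[0], p[1]) for p in periods]
--     try:
--         idx = keys.index((year, period_val))
--         if idx > 0:
--             return periods[idx - 1]
--     except ValueError:
--         pass
--     return None
-- ===== SOURCE B (Python) =====
-- def prev_period_info(periods: list[tuple], year: int, period_val) -> tuple | None:
--     """Single pass tracking the previous row; no key list, no .index, no extra lookup."""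
--     prev = None
--     for p in periods:
--         if p[0] == year and p[1] == period_val:
--             return prev
--         prev = p
--     return None
-- ===== Notes on version B (the rewrite author's own statement) =====
-- stated objective: simpler
-- what changed: Replaces the materialised key list + .index + positional re-lookup with a single scan that carries the previous row and returns it at the first match.
import Mathlib
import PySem

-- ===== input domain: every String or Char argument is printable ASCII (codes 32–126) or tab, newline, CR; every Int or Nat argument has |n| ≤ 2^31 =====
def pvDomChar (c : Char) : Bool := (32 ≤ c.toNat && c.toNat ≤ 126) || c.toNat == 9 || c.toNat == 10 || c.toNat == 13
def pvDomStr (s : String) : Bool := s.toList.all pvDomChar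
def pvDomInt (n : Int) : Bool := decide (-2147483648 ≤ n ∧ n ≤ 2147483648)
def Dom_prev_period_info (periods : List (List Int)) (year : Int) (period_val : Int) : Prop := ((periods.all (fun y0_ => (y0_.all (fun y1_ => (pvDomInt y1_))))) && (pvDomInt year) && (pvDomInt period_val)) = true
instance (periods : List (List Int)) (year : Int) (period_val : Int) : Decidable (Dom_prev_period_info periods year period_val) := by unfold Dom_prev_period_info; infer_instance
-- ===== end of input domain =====

-- B replaces A's key list + .index + positional re-lookup by one scan carrying the previous row (simpler, O(1) extra space).

-- ===== PORT A =====
-- p[0]/p[1] on rows of length ≥ 2 (guaranteed by Pre_); `.getD 0` only totalises outside Pre_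
def prev_period_info (periods : List (List Int)) (year : Int) (period_val : Int) : Option (List Int) :=
  let keys := periods.map (fun p => ((PySem.List.pyGet? p 0).getD 0, (PySem.List.pyGet? p 1).getD 0))
  match PySem.List.index? keys (year, period_val) with
  | some idx => if idx > 0 then PySem.List.pyGet? periods ((idx : Int) - 1) else none
  | none => none

-- ===== PORT B =====
def pvAltGo (year period_val : Int) (prev : Option (List Int)) : List (List Int) → Option (List Int)
  | [] => none
  | p :: rest =>
      if (PySem.List.pyGet? p 0).getD 0 = year ∧ (PySem.List.pyGet? p 1).getD 0 = period_val then prev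
      else pvAltGo year period_val (some p) rest

def prev_period_info_alt (periods : List (List Int)) (year : Int) (period_val : Int) : Option (List Int) :=
  pvAltGo year period_val none periods

-- ===== PRECONDITION & SPEC =====
-- Pre_ excludes rows with fewer than two elements: there the Python A raises IndexError on p[1] (or p[0]).
def Pre_prev_period_info (periods : List (List Int)) (year : Int) (period_val : Int) : Prop :=
  ∀ p ∈ periods, 2 ≤ p.length
instance (periods : List (List Int)) (year : Int) (period_val : Int) : Decidable (Pre_prev_period_info periods year period_val) := by unfold Pre_prev_period_info; infer_instance

def pvWitness_prev_period_info : List (List Int) × Int × Int := ([[2023, 1], [2023, 2], [2024, 1]], 2023, 2)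

def Spec_prev_period_info (periods : List (List Int)) (year : Int) (period_val : Int) (out : Option (List Int)) : Prop := out = prev_period_info_alt periods year period_val
instance (periods : List (List Int)) (year : Int) (period_val : Int) (out : Option (List Int)) : Decidable (Spec_prev_period_info periods year period_val out) := by unfold Spec_prev_period_info; infer_instance

-- ===== CLAIM (what is proved, stated in full; the proofs are below) =====
def Claim_equal_prev_period_info : Prop := ∀ (periods : List (List Int)) (year : Int) (period_val : Int), Dom_prev_period_info periods year period_val → Pre_prev_period_info periods year period_val → Spec_prev_period_info periods year period_val (prev_period_info periods year period_val)

-- ===== LEMMAS AND PROOFS =====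

-- index? on a cons, phrased with propositional equality
theorem pvIdxCons {α : Type} [BEq α] [LawfulBEq α] [DecidableEq α] (x v : α) (xs : List α) :
    PySem.List.index? (x :: xs) v = if x = v then some 0 else (PySem.List.index? xs v).map (· + 1) := by
  simp [PySem.List.index?_eq_idxOf?, List.idxOf?_cons]

-- Core invariant: A's "look up index, then fetch idx-1 (or `prev` when idx = 0)" equals B's scan carrying `prev`.
def pvKey (p : List Int) : Int × Int :=
  ((PySem.List.pyGet? p 0).getD 0, (PySem.List.pyGet? p 1).getD 0)

theorem pvMain (year period_val : Int) (periods : List (List Int)) (prev : Option (List Int)) :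
    (match PySem.List.index? (periods.map pvKey) (year, period_val) with
     | some idx => if idx > 0 then PySem.List.pyGet? periods ((idx : Int) - 1) else prev
     | none => none) = pvAltGo year period_val prev periods := by
  induction periods generalizing prev with
  | nil => simp [PySem.List.index?_eq_idxOf?, pvAltGo]
  | cons p rest ih =>
    rw [List.map_cons, pvIdxCons]
    by_cases h : pvKey p = (year, period_val)
    · simp [pvAltGo, pvKey, Prod.ext_iff] at h ⊢
      simp [h]
    · have h' : ¬((PySem.List.pyGet? p 0).getD 0 = year ∧ (PySem.List.pyGet? p 1).getD 0 = period_val) := by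
        simpa [pvKey, Prod.ext_iff] using h
      rw [if_neg h, pvAltGo, if_neg h', ← ih (some p)]
      cases hidx : PySem.List.index? (rest.map pvKey) (year, period_val) with
      | none => simp
      | some idx =>
        simp only [Option.map_some]
        cases idx with
        | zero => simp
        | succ m => simp [PySem.List.pyGet?_cons_succ]

-- ===== VERDICT (by name: the statement is the Claim_ definition above) =====
theorem prev_period_info_spec : Claim_equal_prev_period_info := by
  intro periods year period_val _ _
  unfold Spec_prev_period_info prev_period_info prev_period_info_alt
  simpa [pvKey] using pvMain year period_val periods none
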